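-- pv_equiv track=rewrite | github.com/HKUST-KnowComp/privacy_checklist | utils.py | list_intersection
-- ===== SOURCE A (Python) =====
-- def list_intersection(candidates, vote_number=-1):
--     if vote_number == -1:
--         ### LHR modified
--         vote_number = len(candidates) // 2 + 1
--     counter = {}
--     for candidate in candidates:
--         for c in candidate:
--             if c not in counter:
--                 counter[c] = 0
--             counter[c] += 1
--     temp = []
--     for key, value in counter.items():
--         if value >= vote_number:
--             temp.append([key, value])
--     ret = []
--     ret = sorted(temp, key=lambda x: x[1], reverse=True)
--     ret = [x[0] for x in ret]
--     return ret
-- ===== SOURCE B (Python) =====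
-- def list_intersection(candidates, vote_number=-1):
--     if vote_number == -1:
--         vote_number = len(candidates) // 2 + 1
--     flat = [c for cand in candidates for c in cand]
--     keys = list(dict.fromkeys(flat))
--     counts = [flat.count(k) for k in keys]
--     result = []
--     if counts:
--         for level in range(max(counts), max(vote_number, 1) - 1, -1):
--             for k, n in zip(keys, counts):
--                 if n == level:
--                     result.append(k)
--     return result
-- ===== Notes on version B (the rewrite author's own statement) =====
-- stated objective: alternative
-- what changed: No incremental counter dict and no sort: B flattens, dedups keys in first-appearance order, counts each distinct key with list.count, and emits keys by sweeping count levels from max(counts) down to the threshold (selection by level instead of sorting).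
import Mathlib
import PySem

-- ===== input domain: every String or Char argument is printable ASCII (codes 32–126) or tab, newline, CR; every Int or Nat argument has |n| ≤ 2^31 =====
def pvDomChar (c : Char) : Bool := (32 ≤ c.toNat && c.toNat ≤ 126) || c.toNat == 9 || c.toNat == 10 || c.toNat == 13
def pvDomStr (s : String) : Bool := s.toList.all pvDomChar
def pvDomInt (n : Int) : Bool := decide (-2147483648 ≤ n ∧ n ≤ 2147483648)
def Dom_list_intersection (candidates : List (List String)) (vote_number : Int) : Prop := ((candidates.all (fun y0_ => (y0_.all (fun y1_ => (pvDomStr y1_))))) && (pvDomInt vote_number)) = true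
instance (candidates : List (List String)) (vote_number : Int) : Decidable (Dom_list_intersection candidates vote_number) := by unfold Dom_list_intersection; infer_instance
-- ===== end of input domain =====

-- B drops both the incremental counter dict and the sort: it dedups the flattened input,
-- counts each distinct key with list.count, and emits keys by sweeping the count levels
-- from max(counts) down to the threshold (objective: alternative; not faster).

-- ===== PORT A =====
def list_intersection (candidates : List (List String)) (vote_number : Int) : List String :=
  let vn := if vote_number = -1 then PySem.Int.floordiv (candidates.length : Int) 2 + 1 else vote_number
  let counter : PySem.Dict String Int :=
    candidates.foldl (fun d candidate =>
      candidate.foldl (fun d c =>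
        let d := if d.contains c then d else d.insert c 0
        -- counter[c] += 1 : the key is present here, so the update never raises
        d.insert c (d.getD c 0 + 1)) d) PySem.Dict.empty
  let temp : List (String × Int) :=
    counter.items.foldl (fun t kv => if vn ≤ kv.2 then t ++ [(kv.1, kv.2)] else t) []
  let ret := PySem.List.sorted temp (fun x => x.2) true
  ret.map (fun x => x.1)

-- ===== PORT B =====
def list_intersection_alt (candidates : List (List String)) (vote_number : Int) : List String :=
  let vn := if vote_number = -1 then PySem.Int.floordiv (candidates.length : Int) 2 + 1 else vote_number
  let flat := candidates.flatMap (fun cand => cand)     -- [c for cand in candidates for c in cand]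
  let keys := PySem.List.dedup flat                     -- list(dict.fromkeys(flat))
  let counts := keys.map (fun k => (PySem.List.count flat k : Int))
  -- 'if counts:' guard = the max? of an empty list is none
  match PySem.List.max? counts (fun x => x) with
  | none => []
  | some maxc =>
    (PySem.List.pyRange maxc (max vn 1 - 1) (-1)).foldl (fun result level =>
      (keys.zip counts).foldl (fun result kn =>
        if kn.2 == level then result ++ [kn.1] else result) result) []

-- ===== PRECONDITION & SPEC =====
def Spec_list_intersection (candidates : List (List String)) (vote_number : Int) (out : List String) : Prop := out = list_intersection_alt candidates vote_number
instance (candidates : List (List String)) (vote_number : Int) (out : List String) : Decidable (Spec_list_intersection candidates vote_number out) := by unfold Spec_list_intersection; infer_instance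

-- ===== CLAIM (what is proved, stated in full; the proofs are below) =====
def Claim_equal_list_intersection : Prop := ∀ (candidates : List (List String)) (vote_number : Int), Dom_list_intersection candidates vote_number → Spec_list_intersection candidates vote_number (list_intersection candidates vote_number)

-- ===== LEMMAS AND PROOFS =====

-- A's "if c not in counter: counter[c] = 0; counter[c] += 1" step equals the direct insert step.
lemma stepA_eq {d : PySem.Dict String Int} {c : String} :
    (let d' := if d.contains c then d else d.insert c 0
     d'.insert c (d'.getD c 0 + 1)) = d.insert c (d.getD c 0 + 1) := by
  by_cases h : d.contains c = true
  · simp [h]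
  · have h' : d.contains c = false := by simpa using h
    simp only [h', Bool.false_eq_true, if_false]
    have hg : (d.insert c 0).getD c 0 = 0 := PySem.Dict.getD_insert_self d c 0 0
    have hg2 : d.getD c 0 = 0 := PySem.Dict.getD_of_not_contains d 0 h'
    rw [hg, hg2]
    apply PySem.Dict.ext
    rw [PySem.Dict.items_insert_of_contains _ _ (PySem.Dict.contains_insert_self d c 0),
        PySem.Dict.items_insert_of_not_contains _ _ h',
        PySem.Dict.items_insert_of_not_contains _ _ h']
    have hall : ∀ p ∈ d.items, (p.1 == c) = false := by
      intro p hp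
      by_contra hb
      have hc : d.contains c = true := by
        simp only [PySem.Dict.contains, List.any_eq_true]
        exact ⟨p, hp, by simpa using hb⟩
      simp [h'] at hc
    rw [List.map_append]
    congr 1
    · have : List.map (fun p => if (p.1 == c) = true then (c, (0:Int) + 1) else p) d.items
          = List.map id d.items :=
        List.map_congr_left (fun p hp => by simp [hall p hp])
      simpa using this
    · simp

-- Both programs count Counter(flatten(candidates)): A's nested loop is that counter.
lemma counter_eq (candidates : List (List String)) :
    candidates.foldl (fun d candidate =>
      candidate.foldl (fun d c =>
        let d' := if d.contains c then d else d.insert c 0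
        d'.insert c (d'.getD c 0 + 1)) d) (PySem.Dict.empty : PySem.Dict String Int)
    = PySem.Dict.counter candidates.flatten := by
  have h1 : ∀ (l : List String) (d : PySem.Dict String Int),
      l.foldl (fun d c =>
        let d' := if d.contains c then d else d.insert c 0
        d'.insert c (d'.getD c 0 + 1)) d
      = l.foldl (fun d c => d.insert c (d.getD c 0 + 1)) d := by
    intro l d
    simp only [stepA_eq]
  have e1 : ∀ (cs : List (List String)) (d : PySem.Dict String Int),
      cs.foldl (fun d candidate =>
        candidate.foldl (fun d c =>
          let d' := if d.contains c then d else d.insert c 0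
          d'.insert c (d'.getD c 0 + 1)) d) d
      = cs.foldl (fun d candidate =>
          candidate.foldl (fun d c => d.insert c (d.getD c 0 + 1)) d) d := by
    intro cs
    induction cs with
    | nil => intro d; rfl
    | cons cand cs ihc =>
      intro d
      simp only [List.foldl_cons]
      rw [h1 cand]
      exact ihc _
  rw [e1, ← List.foldl_flatten]
  exact PySem.Dict.foldl_insert_getD_add_one_eq_counter _

lemma flatMap_congr' {α β : Type} {l : List α} {f g : α → List β}
    (h : ∀ x ∈ l, f x = g x) : l.flatMap f = l.flatMap g := by
  induction l with
  | nil => rfl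
  | cons a l ih =>
    simp only [List.flatMap_cons, h a (by simp), ih (fun x hx => h x (by simp [hx]))]

lemma insertBy_app {α : Type} (before : α → α → Bool) (x : α) (P Q : List α)
    (hP : ∀ y ∈ P, before x y = false) (hQ : ∀ y ∈ Q, before x y = true) :
    PySem.List.insertBy before x (P ++ Q) = P ++ x :: Q := by
  induction P with
  | nil =>
    cases Q with
    | nil => simp [PySem.List.insertBy]
    | cons q qs => simp [PySem.List.insertBy, hQ q (by simp)]
  | cons p P ih =>
    have hp := hP p (by simp)
    simp only [List.cons_append, PySem.List.insertBy, hp, Bool.false_eq_true, if_false]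
    rw [ih (fun y hy => hP y (by simp [hy]))]

lemma mem_flatMap_snd {D : List Int} {ps : List (String × Int)}
    {y : String × Int}
    (hy : y ∈ D.flatMap (fun v => ps.filter (fun kv => kv.2 == v))) :
    y.2 ∈ D := by
  rcases List.mem_flatMap.1 hy with ⟨w, hw, hyf⟩
  have h2 : (fun kv : String × Int => kv.2 == w) y = true := (List.mem_filter.1 hyf).2
  have : y.2 = w := by simpa using h2
  rw [this]; exact hw

-- Core: the stable descending sort by the second component is the concatenation of the
-- per-value filters, taken over any strictly descending list D of exactly the occurring values.
lemma core (ps : List (String × Int)) (D : List Int)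
    (hgt : D.Pairwise (fun a b => b < a))
    (hmem : ∀ v, v ∈ D ↔ v ∈ ps.map (fun kv => kv.2)) :
    PySem.List.sorted ps (fun x => x.2) true
      = D.flatMap (fun v => ps.filter (fun kv => kv.2 == v)) := by
  induction ps using List.reverseRecOn generalizing D with
  | nil =>
    have : D = [] := by
      apply List.eq_nil_iff_forall_not_mem.2
      intro v hv; simpa using (hmem v).1 hv
    subst this; rfl
  | append_singleton ps x ih =>
    have hx2D : x.2 ∈ D := (hmem x.2).2 (by simp)
    rcases List.append_of_mem hx2D with ⟨D1, D2, rfl⟩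
    have hpa := List.pairwise_append.1 hgt
    have hD1gt : ∀ v ∈ D1, x.2 < v := fun v hv => hpa.2.2 v hv x.2 (by simp)
    have hD2lt : ∀ v ∈ D2, v < x.2 := fun v hv => (List.pairwise_cons.1 hpa.2.1).1 v hv
    have hD1ne : ∀ v ∈ D1, ¬ (x.2 = v) := fun v hv h => absurd (hD1gt v hv) (by omega)
    have hD2ne : ∀ v ∈ D2, ¬ (x.2 = v) := fun v hv h => absurd (hD2lt v hv) (by omega)
    have hsortstep : PySem.List.sorted (ps ++ [x]) (fun k => k.2) true
        = PySem.List.insertBy (fun a b => decide (b.2 < a.2)) x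
            (PySem.List.sorted ps (fun k => k.2) true) := by
      rw [PySem.List.sorted_rev_eq_foldl_insertBy, List.foldl_append,
          ← PySem.List.sorted_rev_eq_foldl_insertBy]
      rfl
    have hfilt : ∀ v : Int, (ps ++ [x]).filter (fun kv => kv.2 == v)
        = ps.filter (fun kv => kv.2 == v) ++ (if x.2 = v then [x] else []) := by
      intro v
      rw [List.filter_append]
      congr 1
      by_cases h : x.2 = v <;> simp [h]
    have h1 : D1.flatMap (fun v => (ps ++ [x]).filter (fun kv => kv.2 == v))
        = D1.flatMap (fun v => ps.filter (fun kv => kv.2 == v)) :=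
      flatMap_congr' (fun v hv => by rw [hfilt v]; simp [hD1ne v hv])
    have h2 : D2.flatMap (fun v => (ps ++ [x]).filter (fun kv => kv.2 == v))
        = D2.flatMap (fun v => ps.filter (fun kv => kv.2 == v)) :=
      flatMap_congr' (fun v hv => by rw [hfilt v]; simp [hD2ne v hv])
    have hRHS : (D1 ++ x.2 :: D2).flatMap (fun v => (ps ++ [x]).filter (fun kv => kv.2 == v))
        = D1.flatMap (fun v => ps.filter (fun kv => kv.2 == v))
          ++ (ps.filter (fun kv => kv.2 == x.2) ++ [x])
          ++ D2.flatMap (fun v => ps.filter (fun kv => kv.2 == v)) := by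
      rw [List.flatMap_append, List.flatMap_cons, h1, h2, hfilt x.2]
      simp
    rw [hRHS]
    by_cases hx : x.2 ∈ ps.map (fun kv => kv.2)
    · have hmem' : ∀ v, v ∈ D1 ++ x.2 :: D2 ↔ v ∈ ps.map (fun kv => kv.2) := by
        intro v
        rw [hmem v]
        simp only [List.map_append, List.mem_append, List.map_cons, List.map_nil,
          List.mem_singleton]
        constructor
        · rintro (h | h)
          · exact h
          · rw [h]; exact hx
        · intro h; exact Or.inl h
      have hIH := ih _ hgt hmem'
      rw [hsortstep, hIH, List.flatMap_append, List.flatMap_cons, ← List.append_assoc]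
      rw [insertBy_app _ x
          (D1.flatMap (fun v => ps.filter (fun kv => kv.2 == v))
            ++ ps.filter (fun kv => kv.2 == x.2))
          (D2.flatMap (fun v => ps.filter (fun kv => kv.2 == v)))
          (by
            intro y hy
            rcases List.mem_append.1 hy with h | h
            · have hm := hD1gt _ (mem_flatMap_snd h)
              simp only [decide_eq_false_iff_not]; omega
            · have hb : (fun kv : String × Int => kv.2 == x.2) y = true :=
                (List.mem_filter.1 h).2
              have : y.2 = x.2 := by simpa using hb
              simp only [decide_eq_false_iff_not]; omega)
          (by
            intro y hy
            have := hD2lt _ (mem_flatMap_snd hy)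
            simpa using this)]
      simp
    · have hpairs' : (D1 ++ D2).Pairwise (fun a b => b < a) := by
        rw [List.pairwise_append]
        exact ⟨hpa.1, (List.pairwise_cons.1 hpa.2.1).2,
          fun a ha b hb => hpa.2.2 a ha b (by simp [hb])⟩
      have hmem' : ∀ v, v ∈ D1 ++ D2 ↔ v ∈ ps.map (fun kv => kv.2) := by
        intro v
        constructor
        · intro hv
          have hvD : v ∈ D1 ++ x.2 :: D2 := by
            rcases List.mem_append.1 hv with h | h
            · exact List.mem_append.2 (Or.inl h)
            · exact List.mem_append.2 (Or.inr (List.mem_cons.2 (Or.inr h)))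
          have hm := (hmem v).1 hvD
          simp only [List.map_append, List.mem_append, List.map_cons, List.map_nil,
            List.mem_singleton] at hm
          rcases hm with h | h
          · exact h
          · exfalso
            rcases List.mem_append.1 hv with h1 | h1
            · exact hD1ne v h1 h.symm
            · exact hD2ne v h1 h.symm
        · intro hv
          have hvD : v ∈ D1 ++ x.2 :: D2 := (hmem v).2 (by simp [hv])
          have hne : v ≠ x.2 := fun h => hx (h ▸ hv)
          rcases List.mem_append.1 hvD with h | h
          · exact List.mem_append.2 (Or.inl h)
          · rcases List.mem_cons.1 h with h | h
            · exact absurd h hne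
            · exact List.mem_append.2 (Or.inr h)
      have hIH := ih _ hpairs' hmem'
      have hfx : ps.filter (fun kv => kv.2 == x.2) = [] := by
        apply List.filter_eq_nil_iff.2
        intro kv hkv
        simp only [beq_iff_eq]
        intro h
        exact hx (by simpa using List.mem_map.2 ⟨kv, hkv, h⟩)
      rw [hsortstep, hIH, List.flatMap_append]
      rw [insertBy_app _ x
          (D1.flatMap (fun v => ps.filter (fun kv => kv.2 == v)))
          (D2.flatMap (fun v => ps.filter (fun kv => kv.2 == v)))
          (by
            intro y hy
            have := hD1gt _ (mem_flatMap_snd hy)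
            simp only [decide_eq_false_iff_not]; omega)
          (by
            intro y hy
            have := hD2lt _ (mem_flatMap_snd hy)
            simpa using this)]
      rw [hfx]
      simp

-- a flatMap over a list may drop the entries whose image is empty
lemma flatMap_filter_eq {β : Type} (R : List Int) (p : Int → Bool) (g : Int → List β)
    (h : ∀ v ∈ R, p v = false → g v = []) :
    R.flatMap g = (R.filter p).flatMap g := by
  induction R with
  | nil => rfl
  | cons a R ih =>
    have ih' := ih (fun v hv hpv => h v (by simp [hv]) hpv)
    cases hp : p a
    · simp [hp, h a (by simp) hp, ih']
    · simp [hp, ih']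

lemma pairwise_gt_pyRange_neg_one (a b : Int) :
    (PySem.List.pyRange a b (-1)).Pairwise (fun x y => y < x) := by
  rw [PySem.List.pyRange_neg_one]
  rw [List.pairwise_map]
  exact (List.pairwise_lt_range).imp (fun h => by omega)

lemma ofList_nil_of_eq_nil {xs : List String} (h : PySem.Set.ofList xs = []) : xs = [] := by
  cases xs with
  | nil => rfl
  | cons x t =>
    exfalso
    have hx : x ∈ PySem.Set.ofList (x :: t) := (PySem.Set.mem_ofList _ _).2 (by simp)
    rw [h] at hx
    simp at hx

-- ===== VERDICT (by name: the statement is the Claim_ definition above) =====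
theorem list_intersection_spec : Claim_equal_list_intersection := by
  intro candidates vote_number _
  unfold Spec_list_intersection list_intersection list_intersection_alt
  simp only [counter_eq, List.flatMap_id', PySem.List.dedup_eq_ofList, PySem.List.count_eq]
  set vn := if vote_number = -1 then PySem.Int.floordiv (candidates.length : Int) 2 + 1 else vote_number with hvn
  generalize candidates.flatten = flat
  set C := PySem.Dict.counter flat with hC
  set keys := PySem.Set.ofList flat with hkeys
  set counts := keys.map (fun k => (flat.count k : Int)) with hcounts
  have hpairs : keys.zip counts = C.items := by
    have hz := @List.zip_map' String String Int id (fun k => (flat.count k : Int)) keys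
    rw [hC, PySem.Dict.items_counter, ← hkeys, hcounts]
    simpa using hz
  -- temp (A) is the filtered items list
  have htemp : C.items.foldl (fun t kv => if vn ≤ kv.2 then t ++ [(kv.1, kv.2)] else t) []
      = C.items.filter (fun kv => decide (vn ≤ kv.2)) := by
    have := PySem.List.foldl_append_if (fun kv : String × Int => decide (vn ≤ kv.2))
      (fun kv => (kv.1, kv.2)) C.items []
    simp only [decide_eq_true_eq] at this
    rw [this]
    simp
  rw [htemp]
  set ps := C.items.filter (fun kv => decide (vn ≤ kv.2)) with hps
  cases hmax : PySem.List.max? counts (fun x => x) with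
  | none =>
    -- counts is empty, so flat is empty: both sides are []
    have hc : counts = [] := (PySem.List.max?_eq_none_iff _ _).1 hmax
    have hk : keys = [] := List.map_eq_nil_iff.1 (hcounts ▸ hc)
    have hf : flat = [] := ofList_nil_of_eq_nil (hkeys ▸ hk)
    subst hf
    rfl
  | some maxc =>
    -- facts about any occurring filtered count v
    have hocc : ∀ v, v ∈ ps.map (fun kv => kv.2) → vn ≤ v ∧ 1 ≤ v ∧ v ≤ maxc := by
      intro v hv
      rcases List.mem_map.1 hv with ⟨kv, hkv, rfl⟩
      have hm := List.mem_filter.1 (hps ▸ hkv)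
      have hvn : vn ≤ kv.2 := by simpa using hm.2
      have hitems := hm.1
      rw [hC, PySem.Dict.items_counter] at hitems
      rcases List.mem_map.1 hitems with ⟨k, hk, rfl⟩
      refine ⟨hvn, ?_, ?_⟩
      · have hkflat : k ∈ flat := (PySem.Set.mem_ofList _ _).1 hk
        have := List.count_pos_iff.2 hkflat
        simp only []
        omega
      · have hin : (flat.count k : Int) ∈ counts := by
          rw [hcounts]
          exact List.mem_map.2 ⟨k, hkeys ▸ hk, rfl⟩
        exact PySem.List.max?_isMax hmax _ hin
    -- B's nested foldls: append-if inner loop, extend outer loop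
    rw [hpairs]
    simp only [PySem.List.foldl_append_if]
    rw [PySem.List.foldl_append_eq_flatMap, List.nil_append]
    set R := PySem.List.pyRange maxc (max vn 1 - 1) (-1) with hR
    set D := R.filter (fun v => decide (v ∈ ps.map (fun kv => kv.2))) with hD
    -- drop the levels at which nothing is emitted
    rw [flatMap_filter_eq R (fun v => decide (v ∈ ps.map (fun kv => kv.2)))
        (fun level => (C.items.filter (fun kn => kn.2 == level)).map (fun kn => kn.1))
        (by
          intro v hvR hpv
          simp only [decide_eq_false_iff_not] at hpv
          apply List.map_eq_nil_iff.2
          apply List.filter_eq_nil_iff.2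
          intro kv hkv hbeq
          have hv2 : kv.2 = v := by simpa using hbeq
          have hvnv : vn ≤ v := by
            have := (PySem.List.mem_pyRange_neg_one.1 (hR ▸ hvR)).1
            omega
          exact hpv (List.mem_map.2 ⟨kv, List.mem_filter.2 ⟨hkv, by simp [hv2]; omega⟩, hv2⟩))]
    rw [← hD]
    -- inside D the unfiltered and filtered per-level lists agree
    have hDsub : ∀ v ∈ D, vn ≤ v := by
      intro v hv
      have hvR : v ∈ R := (List.mem_filter.1 (hD ▸ hv)).1
      have := (PySem.List.mem_pyRange_neg_one.1 (hR ▸ hvR)).1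
      omega
    have hfeq : ∀ v ∈ D, C.items.filter (fun kn => kn.2 == v) = ps.filter (fun kv => kv.2 == v) := by
      intro v hv
      rw [hps, List.filter_filter]
      apply List.filter_congr
      intro kv _
      cases hb : (kv.2 == v)
      · simp
      · have hv2 : kv.2 = v := by simpa using hb
        have hvnv := hDsub v hv
        have hdec : decide (vn ≤ kv.2) = true := by
          simp only [decide_eq_true_eq]
          omega
        simp [hdec]
    -- A's sorted-and-projected list, via the core decomposition over D
    have hmemD : ∀ v, v ∈ D ↔ v ∈ ps.map (fun kv => kv.2) := by
      intro v
      constructor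
      · intro hv
        have := (List.mem_filter.1 (hD ▸ hv)).2
        simpa using this
      · intro hv
        rcases hocc v hv with ⟨h1, h2, h3⟩
        refine (hD ▸ List.mem_filter.2 ⟨?_, by simpa using hv⟩)
        rw [hR]
        apply PySem.List.mem_pyRange_neg_one.2
        constructor
        · omega
        · exact h3
    have hgtD : D.Pairwise (fun a b => b < a) := by
      rw [hD]
      exact List.Pairwise.filter _ (pairwise_gt_pyRange_neg_one _ _)
    rw [core ps D hgtD hmemD, List.map_flatMap]
    exact flatMap_congr' (fun v hv => by rw [hfeq v hv])
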